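-- pv_equiv track=rewrite | github.com/riccardovacirca/grapheme | grapheme.py | valid_sequence_format
-- ===== SOURCE A (Python) =====
-- def valid_sequence_format(lst):
--   in_sequence_of_ones = False
--   for i in range(len(lst)):
--       if lst[i] == 1:
--           in_sequence_of_ones = True
--       elif lst[i] == 0:
--           if in_sequence_of_ones:
--               in_sequence_of_ones = False
--           else:
--               return False
--       else:
--           return False
--   return True
-- ===== SOURCE B (Python) =====
-- def valid_sequence_format(lst):
--     if not all(x in (0, 1) for x in lst):
--         return False
--     if lst and lst[0] == 0:
--         return False
--     return all(not (a == 0 and b == 0) for a, b in zip(lst, lst[1:]))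
-- ===== Notes on version B (the rewrite author's own statement) =====
-- stated objective: alternative
-- what changed: Replaces the single carried-flag state machine with three stateless passes: a membership check that every element is 0 or 1, a leading-zero check, and an adjacent-pairs check over zip(lst, lst[1:]) forbidding consecutive zeros.
import Mathlib
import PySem

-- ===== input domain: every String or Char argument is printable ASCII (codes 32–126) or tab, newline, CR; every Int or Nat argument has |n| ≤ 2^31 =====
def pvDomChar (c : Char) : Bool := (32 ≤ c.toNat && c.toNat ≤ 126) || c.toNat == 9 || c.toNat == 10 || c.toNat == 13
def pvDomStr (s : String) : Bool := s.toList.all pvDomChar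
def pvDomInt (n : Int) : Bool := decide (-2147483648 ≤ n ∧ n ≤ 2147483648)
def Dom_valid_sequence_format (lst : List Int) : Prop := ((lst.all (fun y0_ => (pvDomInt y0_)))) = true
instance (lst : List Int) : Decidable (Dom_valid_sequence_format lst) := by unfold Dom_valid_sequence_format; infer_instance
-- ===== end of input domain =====

-- B replaces A's carried-flag state-machine pass with three stateless passes (membership, leading zero, adjacent pairs); same cost, different decomposition.


-- ===== PORT A =====
-- A's loop over range(len(lst)), carrying the flag in_sequence_of_ones
def pvLoopA : List Int → Bool → Bool
  | [], _ => true
  | x :: xs, flag =>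
    if x == 1 then pvLoopA xs true
    else if x == 0 then
      (if flag then pvLoopA xs false else false)
    else false

def valid_sequence_format (lst : List Int) : Bool := pvLoopA lst false

-- ===== PORT B =====
-- Source B: membership pass, leading-zero check, then adjacent pairs over zip(lst, lst[1:])
def valid_sequence_format_alt (lst : List Int) : Bool :=
  if !(lst.all (fun x => x == 0 || x == 1)) then false
  else if (match lst with | [] => false | x :: _ => x == 0) then false
  else (lst.zip lst.tail).all (fun p => !(p.1 == 0 && p.2 == 0))

-- ===== PRECONDITION & SPEC =====
def Spec_valid_sequence_format (lst : List Int) (out : Bool) : Prop := out = valid_sequence_format_alt lst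
instance (lst : List Int) (out : Bool) : Decidable (Spec_valid_sequence_format lst out) := by unfold Spec_valid_sequence_format; infer_instance

-- ===== CLAIM (what is proved, stated in full; the proofs are below) =====
def Claim_equal_valid_sequence_format : Prop := ∀ (lst : List Int), Dom_valid_sequence_format lst → Spec_valid_sequence_format lst (valid_sequence_format lst)

-- ===== LEMMAS AND PROOFS =====
-- head condition: a leading 0 is allowed exactly when the carried flag is true
def pvHeadOk : List Int → Bool → Bool
  | [], _ => true
  | x :: _, flag => if x == 0 then flag else true

-- invariant of A's loop: the carried flag only matters for a leading zero
lemma pvLoopA_eq (lst : List Int) : ∀ flag,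
    pvLoopA lst flag =
      ((lst.all (fun x => x == 0 || x == 1)) && pvHeadOk lst flag &&
        (lst.zip lst.tail).all (fun p => !(p.1 == 0 && p.2 == 0))) := by
  induction lst with
  | nil => intro flag; simp [pvLoopA, pvHeadOk]
  | cons x xs ih =>
    intro flag
    show (if x == 1 then pvLoopA xs true
          else if x == 0 then (if flag then pvLoopA xs false else false)
          else false) = _
    by_cases h1 : x = 1
    · rw [if_pos (by simp [h1]), ih true]
      subst h1
      cases xs with
      | nil => simp [pvHeadOk]
      | cons y ys =>
        by_cases hy : y = 0 <;>
          simp [pvHeadOk, hy, Bool.and_comm, Bool.and_assoc]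
    · by_cases h0 : x = 0
      · rw [if_neg (by simp [h1]), if_pos (by simp [h0])]
        subst h0
        cases flag with
        | false => simp [pvHeadOk]
        | true =>
          rw [if_pos rfl, ih false]
          cases xs with
          | nil => simp [pvHeadOk]
          | cons y ys =>
            by_cases hy : y = 0 <;>
              simp [pvHeadOk, hy, Bool.and_comm, Bool.and_left_comm, Bool.and_assoc]
      · rw [if_neg (by simp [h1]), if_neg (by simp [h0])]
        simp [pvHeadOk, h0, h1]

lemma pvAB (lst : List Int) : valid_sequence_format lst = valid_sequence_format_alt lst := by
  rw [valid_sequence_format, pvLoopA_eq lst false]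
  unfold valid_sequence_format_alt
  cases lst with
  | nil => simp [pvHeadOk]
  | cons x xs =>
    by_cases hx : x = 0
    · simp [pvHeadOk, hx]
    · by_cases h1 : x = 1
      · subst h1
        simp [pvHeadOk]
        rw [Bool.eq_iff_iff]
        simp
        intro _
        exact ⟨fun h x hx h0 => (h x hx).resolve_left h0,
               fun h x hx => or_iff_not_imp_left.mpr (h x hx)⟩
      · simp [pvHeadOk, hx, h1]

-- ===== VERDICT (by name: the statement is the Claim_ definition above) =====
theorem valid_sequence_format_spec : Claim_equal_valid_sequence_format := by
  intro lst _
  unfold Spec_valid_sequence_format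
  exact pvAB lst
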